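-- pv_equiv track=rewrite | github.com/Mariia-21/My_Python | Work_with_filesTask_1.py | summRow
-- ===== SOURCE A (Python) =====
-- def summRow(mass, N):
--     j = 0
--     summ = 0
--     mass1 = []
--     while j < N:
--         for i in range(N):
--             summ += mass[i][j]
--         mass1.append(summ)
--         j += 1
--
--     return mass1
-- ===== SOURCE B (Python) =====
-- def summRow(mass, N):
--     res = [0] * N
--     for i in range(N):
--         run = 0
--         for j in range(N):
--             run += mass[i][j]
--             res[j] += run
--     return res
-- ===== Notes on version B (the rewrite author's own statement) =====
-- stated objective: alternative
-- what changed: A iterates column-major with one global never-reset accumulator, appending prefix sums of the column totals; B swaps the loop nesting: it walks row-major, takes each row's running prefix sum and adds it elementwise into a preallocated result vector (correct because result[j] = sum over rows i of the row-prefix sum mass[i][0..j], by exchanging the two summations).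
import Mathlib
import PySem

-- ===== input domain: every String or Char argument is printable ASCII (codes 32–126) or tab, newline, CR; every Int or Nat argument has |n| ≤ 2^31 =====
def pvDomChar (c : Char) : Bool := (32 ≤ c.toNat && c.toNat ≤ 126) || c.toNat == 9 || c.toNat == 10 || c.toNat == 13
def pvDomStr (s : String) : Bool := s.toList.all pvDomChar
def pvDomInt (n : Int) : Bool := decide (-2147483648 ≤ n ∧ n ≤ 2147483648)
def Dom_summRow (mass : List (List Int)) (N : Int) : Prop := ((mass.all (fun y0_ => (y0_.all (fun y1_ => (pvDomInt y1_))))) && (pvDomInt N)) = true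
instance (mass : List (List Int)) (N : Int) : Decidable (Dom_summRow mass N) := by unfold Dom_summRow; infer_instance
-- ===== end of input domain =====

-- B swaps A's loop nesting: instead of A's column-major walk with one global accumulator,
-- B walks row-major, adding each row's running prefix sum elementwise into a preallocated
-- result vector; same cost, a genuinely different traversal (return value only).

-- ===== PORT A =====
def summRow (mass : List (List Int)) (N : Int) : List Int :=
  ((PySem.List.pyRange 0 N 1).foldl
    (fun (st : Int × List Int) j =>
      let summ := (PySem.List.pyRange 0 N 1).foldl
        (fun s i => s + PySem.List.pyGetD (PySem.List.pyGetD mass i []) j 0) st.1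
      (summ, st.2 ++ [summ]))
    (0, [])).2

-- ===== PORT B =====
def summRow_alt (mass : List (List Int)) (N : Int) : List Int :=
  (PySem.List.pyRange 0 N 1).foldl
    (fun res i =>
      ((PySem.List.pyRange 0 N 1).foldl
        (fun (st : Int × List Int) j =>
          let run := st.1 + PySem.List.pyGetD (PySem.List.pyGetD mass i []) j 0
          (run, PySem.List.pySetD st.2 j (PySem.List.pyGetD st.2 j 0 + run)))
        (0, res)).2)
    (List.replicate N.toNat 0)

-- ===== PRECONDITION & SPEC =====
-- A (and B) raise IndexError when N exceeds the number of rows or the length of one of the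
-- first N rows; Pre_ excludes exactly those inputs.
def Pre_summRow (mass : List (List Int)) (N : Int) : Prop :=
  N.toNat ≤ mass.length ∧ ∀ row ∈ mass.take N.toNat, N.toNat ≤ row.length
instance (mass : List (List Int)) (N : Int) : Decidable (Pre_summRow mass N) := by
  unfold Pre_summRow; infer_instance
def pvWitness_summRow : List (List Int) × Int := ([[1, 2], [3, 4]], 2)

def Spec_summRow (mass : List (List Int)) (N : Int) (out : List Int) : Prop := out = summRow_alt mass N
instance (mass : List (List Int)) (N : Int) (out : List Int) : Decidable (Spec_summRow mass N out) := by unfold Spec_summRow; infer_instance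

-- ===== CLAIM (what is proved, stated in full; the proofs are below) =====
def Claim_equal_summRow : Prop := ∀ (mass : List (List Int)) (N : Int), Dom_summRow mass N → Pre_summRow mass N → Spec_summRow mass N (summRow mass N)

-- ===== LEMMAS AND PROOFS =====

-- prefix sum of g over positions 0..j
def pvPfx (g : Nat → Int) (j : Nat) : Int := ((List.range (j + 1)).map g).sum

-- loop bodies of the two ports, Nat-indexed
def pvStepA (c : Nat → Int) (st : Int × List Int) (j : Nat) : Int × List Int :=
  (st.1 + c j, st.2 ++ [st.1 + c j])
def pvStepB (g : Nat → Int) (st : Int × List Int) (j : Nat) : Int × List Int :=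
  (st.1 + g j, st.2.set j (st.2.getD j 0 + (st.1 + g j)))

theorem pvRange_eq (N : Int) :
    PySem.List.pyRange 0 N 1 = (List.range N.toNat).map (fun k : Nat => (k : Int)) := by
  rcases (by omega : N ≤ 0 ∨ 0 < N) with h | h
  · rw [PySem.List.pyRange_one_eq_nil h]
    have hN : N.toNat = 0 := Int.toNat_of_nonpos h
    simp [hN]
  · have hN : ((N.toNat : Int)) = N := Int.toNat_of_nonneg h.le
    conv_lhs => rw [← hN]
    rw [PySem.List.pyRange_zero_nat]

-- A's outer loop in closed form
theorem pvA_loop (c : Nat → Int) (n : Nat) (s : Int) (acc : List Int) :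
    (List.range n).foldl (pvStepA c) (s, acc)
      = (s + ((List.range n).map c).sum,
         acc ++ (List.range n).map (fun j => s + pvPfx c j)) := by
  induction n generalizing acc with
  | zero => simp [pvStepA]
  | succ n ih =>
      have hsum : (List.map c (List.range (n + 1))).sum = (List.map c (List.range n)).sum + c n := by
        rw [List.range_succ]; simp
      conv_lhs => rw [List.range_succ]
      rw [List.foldl_append, ih]
      simp only [List.foldl_cons, List.foldl_nil, pvStepA, Prod.mk.injEq]
      refine ⟨by rw [hsum]; ring, ?_⟩
      conv_rhs => rw [List.range_succ]
      rw [List.map_append, List.append_assoc]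
      congr 1
      simp only [List.map_cons, List.map_nil, List.cons.injEq, and_true, pvPfx]
      rw [hsum]
      ring

-- getD after a point update
theorem pvGetD_set (l : List Int) (j k : Nat) (v : Int) :
    (l.set j v).getD k 0 = if k = j ∧ j < l.length then v else l.getD k 0 := by
  simp only [List.getD_eq_getElem?_getD, List.getElem?_set]
  split_ifs with h1 h2 h3 h4 <;> simp_all <;> omega

-- B's inner loop: length is preserved
theorem pvB_inner_len (g : Nat → Int) (n : Nat) (s : Int) (res : List Int) :
    (((List.range n).foldl (pvStepB g) (s, res)).2).length = res.length := by
  induction n generalizing s res with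
  | zero => simp
  | succ n ih =>
      rw [List.range_succ, List.foldl_append]
      simp only [List.foldl_cons, List.foldl_nil, pvStepB]
      rw [List.length_set, ih]

-- B's inner loop: first component is the running row sum
theorem pvB_inner_fst (g : Nat → Int) (n : Nat) (s : Int) (res : List Int) :
    ((List.range n).foldl (pvStepB g) (s, res)).1 = s + ((List.range n).map g).sum := by
  induction n generalizing s res with
  | zero => simp
  | succ n ih =>
      rw [List.range_succ, List.foldl_append]
      simp only [List.foldl_cons, List.foldl_nil, pvStepB]
      rw [ih]
      simp [List.range_succ]
      ring

-- B's inner loop: elementwise effect on the result vector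
theorem pvB_inner_getD (g : Nat → Int) (n : Nat) (s : Int) (res : List Int) (k : Nat) :
    (((List.range n).foldl (pvStepB g) (s, res)).2).getD k 0
      = if k < n ∧ k < res.length then res.getD k 0 + (s + pvPfx g k) else res.getD k 0 := by
  induction n generalizing s res with
  | zero => simp
  | succ n ih =>
      rw [List.range_succ, List.foldl_append]
      simp only [List.foldl_cons, List.foldl_nil, pvStepB]
      rw [pvGetD_set, pvB_inner_len, pvB_inner_fst]
      by_cases hk : k = n
      · subst hk
        rw [ih]
        by_cases hl : k < res.length
        · simp [hl, pvPfx, List.range_succ]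
          ring
        · simp [hl]
      · rw [ih]
        by_cases hkn : k < n
        · simp [hk, hkn, Nat.lt_succ_of_lt hkn]
        · have h2 : ¬ k < n + 1 := by omega
          simp [hk, hkn, h2]

-- exchange of the two finite sums
theorem pvSum_swap (h : Nat → Nat → Int) (a b : Nat) :
    ((List.range a).map (fun x => ((List.range b).map (fun y => h x y)).sum)).sum
      = ((List.range b).map (fun y => ((List.range a).map (fun x => h x y)).sum)).sum := by
  induction a with
  | zero => simp
  | succ a ih =>
      have hrw : (fun y => ((List.range (a + 1)).map (fun x => h x y)).sum)
          = fun y => ((List.range a).map (fun x => h x y)).sum + h a y := by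
        funext y
        rw [List.range_succ]
        simp
      rw [hrw, PySem.List.sum_map_add_int, List.range_succ, List.map_append,
        List.sum_append, ih]
      simp

-- B's outer loop: length and elementwise value
theorem pvB_outer (G : Nat → Nat → Int) (n m : Nat) :
    (((List.range m).foldl
        (fun res i => ((List.range n).foldl (pvStepB (G i)) (0, res)).2)
        (List.replicate n 0)).length = n) ∧
    (∀ k, ((List.range m).foldl
        (fun res i => ((List.range n).foldl (pvStepB (G i)) (0, res)).2)
        (List.replicate n 0)).getD k 0
      = if k < n then ((List.range m).map (fun i => pvPfx (G i) k)).sum else 0) := by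
  induction m with
  | zero =>
      refine ⟨by simp, fun k => ?_⟩
      by_cases hk : k < n <;> simp [List.getD_eq_getElem?_getD, List.getElem?_replicate, hk]
  | succ m ih =>
      rw [List.range_succ, List.foldl_append]
      simp only [List.foldl_cons, List.foldl_nil]
      refine ⟨by rw [pvB_inner_len, ih.1], fun k => ?_⟩
      rw [pvB_inner_getD, ih.1, ih.2 k]
      by_cases hk : k < n
      · simp only [hk, ih.1, and_self, if_true, if_pos, List.range_succ, List.map_append,
          List.sum_append, List.map_cons, List.map_nil, List.sum_cons, List.sum_nil]
        ring
      · simp [hk]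

-- ===== VERDICT (by name: the statement is the Claim_ definition above) =====
theorem summRow_spec : Claim_equal_summRow := by
  intro mass N _ _
  unfold Spec_summRow summRow summRow_alt
  rw [pvRange_eq]
  set n := N.toNat with hn
  set G : Nat → Nat → Int := fun i j => (mass.getD i []).getD j 0 with hG
  set colS : Nat → Int := fun j => ((List.range n).map (fun i => G i j)).sum with hcolS
  -- A side
  have hA : ((List.range n).map (fun k : Nat => (k : Int))).foldl
      (fun (st : Int × List Int) j =>
        let summ := ((List.range n).map (fun k : Nat => (k : Int))).foldl
          (fun s i => s + PySem.List.pyGetD (PySem.List.pyGetD mass i []) j 0) st.1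
        (summ, st.2 ++ [summ]))
      (0, []) = (List.range n).foldl (pvStepA colS) (0, []) := by
    rw [List.foldl_map]
    apply PySem.List.foldl_congr_mem
    intro st j _
    rw [List.foldl_map]
    have hin : List.foldl
        (fun (x : Int) (y : Nat) => x + PySem.List.pyGetD (PySem.List.pyGetD mass ↑y []) (↑j) 0)
        st.1 (List.range n) = st.1 + colS j := by
      rw [show (fun (x : Int) (y : Nat) => x + PySem.List.pyGetD (PySem.List.pyGetD mass ↑y []) (↑j) 0)
            = fun (x : Int) (y : Nat) => x + G y j from by funext x y; simp [hG]]
      rw [PySem.List.foldl_add]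
    simp only [pvStepA, hin]
  -- B side
  have hB : ((List.range n).map (fun k : Nat => (k : Int))).foldl
      (fun res i =>
        (((List.range n).map (fun k : Nat => (k : Int))).foldl
          (fun (st : Int × List Int) j =>
            let run := st.1 + PySem.List.pyGetD (PySem.List.pyGetD mass i []) j 0
            (run, PySem.List.pySetD st.2 j (PySem.List.pyGetD st.2 j 0 + run)))
          (0, res)).2)
      (List.replicate n 0)
      = (List.range n).foldl
          (fun res i => ((List.range n).foldl (pvStepB (G i)) (0, res)).2)
          (List.replicate n 0) := by
    rw [List.foldl_map]
    apply PySem.List.foldl_congr_mem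
    intro res i _
    rw [List.foldl_map]
    congr 1
    apply PySem.List.foldl_congr_mem
    intro st j _
    simp [pvStepB, hG]
  rw [hA, hB, pvA_loop]
  dsimp only
  have hout := pvB_outer G n n
  apply List.ext_getElem
  · simp [hout.1]
  · intro k h1 h2
    have hk : k < n := by simpa using h1
    have hBk : ((List.range n).foldl
        (fun res i => ((List.range n).foldl (pvStepB (G i)) (0, res)).2)
        (List.replicate n 0))[k] = ((List.range n).map (fun i => pvPfx (G i) k)).sum := by
      have := hout.2 k
      rw [if_pos hk] at this
      rw [← this, List.getD_eq_getElem?_getD, List.getElem?_eq_getElem h2]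
      rfl
    rw [hBk]
    simp only [List.nil_append, List.getElem_map, List.getElem_range, zero_add, pvPfx, hcolS]
    exact pvSum_swap (fun x y => G y x) (k + 1) n
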